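-- pv_equiv track=rewrite | github.com/SanazSaadatifar/-Introduction-to-Programming-with-Python-course-projects | hw3-cycles-SanazSaadatifar/hw3_cycles.py | hasEveryNumber
-- ===== SOURCE A (Python) =====
-- def hasEveryNumber(path):
--     if len(path)==0:
--         return False
--     i = 0
--     while i <= len(path)-1 :
--         if (not i in path):
--             return False
--         i +=1
--
--     return True
-- ===== SOURCE B (Python) =====
-- def hasEveryNumber(path):
--     return len(path) != 0 and set(path) == set(range(len(path)))
-- ===== Notes on version B (the rewrite author's own statement) =====
-- stated objective: simpler
-- what changed: Replaces the per-index while loop with repeated 'i in path' membership scans by building set(path) once and comparing it to set(range(len(path))) in one expression.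
import Mathlib
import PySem

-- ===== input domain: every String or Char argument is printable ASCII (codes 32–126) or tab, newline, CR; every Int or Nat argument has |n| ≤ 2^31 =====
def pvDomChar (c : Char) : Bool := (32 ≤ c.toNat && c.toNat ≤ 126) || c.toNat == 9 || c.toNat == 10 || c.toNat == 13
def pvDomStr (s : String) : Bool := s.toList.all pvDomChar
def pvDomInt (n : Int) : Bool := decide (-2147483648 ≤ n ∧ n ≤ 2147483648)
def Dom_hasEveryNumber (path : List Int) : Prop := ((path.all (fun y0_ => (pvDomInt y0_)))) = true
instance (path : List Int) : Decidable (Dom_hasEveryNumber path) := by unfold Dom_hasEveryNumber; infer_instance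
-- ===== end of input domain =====

-- B replaces A's per-index while loop (each step scanning `i in path`) by building the
-- set of path's elements once and comparing it with set(range(len(path))) (objective: simpler).

-- ===== PORT A =====
-- the while loop: fuel = number of remaining iterations (≥ len - i at every call)
def pvALoop (path : List Int) : Nat → Int → Bool
  | 0, _ => true
  | fuel + 1, i =>
      if i ≤ (path.length : Int) - 1 then
        if !(path.contains i) then false
        else pvALoop path fuel (i + 1)
      else true

def hasEveryNumber (path : List Int) : Bool :=
  if path.length == 0 then false
  else pvALoop path path.length 0

-- ===== PORT B =====
def hasEveryNumber_alt (path : List Int) : Bool :=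
  path.length != 0 &&
    PySem.Set.equal (PySem.Set.ofList path)
      (PySem.Set.ofList (PySem.List.pyRange 0 (path.length : Int) 1))

-- ===== PRECONDITION & SPEC =====
def Spec_hasEveryNumber (path : List Int) (out : Bool) : Prop := out = hasEveryNumber_alt path
instance (path : List Int) (out : Bool) : Decidable (Spec_hasEveryNumber path out) := by unfold Spec_hasEveryNumber; infer_instance

-- ===== CLAIM (what is proved, stated in full; the proofs are below) =====
def Claim_equal_hasEveryNumber : Prop := ∀ (path : List Int), Dom_hasEveryNumber path → Spec_hasEveryNumber path (hasEveryNumber path)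

-- ===== LEMMAS AND PROOFS =====

-- A's loop, run with enough fuel, decides: every index j with i ≤ j < len is an element of path.
theorem pvALoop_true_iff (path : List Int) (fuel : Nat) (i : Int)
    (h : (path.length : Int) ≤ i + fuel) :
    pvALoop path fuel i = true ↔ ∀ j : Int, i ≤ j → j < (path.length : Int) → j ∈ path := by
  induction fuel generalizing i with
  | zero =>
    simp only [pvALoop]
    constructor
    · intro _ j hij hjl; omega
    · intro _; trivial
  | succ f ih =>
    simp only [pvALoop]
    by_cases hc : i ≤ (path.length : Int) - 1
    · rw [if_pos hc]
      by_cases hm : i ∈ path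
      · simp only [List.contains_eq_mem, hm, decide_true, Bool.not_true, Bool.false_eq_true,
          if_false]
        rw [ih (i + 1) (by omega)]
        constructor
        · intro hall j hij hjl
          rcases eq_or_lt_of_le hij with rfl | hlt
          · exact hm
          · exact hall j (by omega) hjl
        · intro hall j hij hjl; exact hall j (by omega) hjl
      · simp only [List.contains_eq_mem, hm, decide_false, Bool.not_false, if_true,
          Bool.false_eq_true, false_iff]
        intro hall
        exact hm (hall i le_rfl (by omega))
    · rw [if_neg hc]
      constructor
      · intro _ j hij hjl; omega
      · intro _; rfl

-- pigeonhole: if path (length n) contains every element of the n-element Nodup list r,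
-- then membership in path coincides with membership in r
theorem mem_iff_of_superset_same_length (path r : List Int) (hnd : r.Nodup)
    (hlen : r.length = path.length) (hsub : ∀ x ∈ r, x ∈ path) :
    ∀ x, x ∈ path ↔ x ∈ r := by
  have hsp : List.Subperm r path := List.subperm_of_subset hnd hsub
  have hperm : List.Perm r path := hsp.perm_of_length_le (by omega)
  intro x
  exact ⟨fun hx => hperm.mem_iff.mpr hx, fun hx => hperm.mem_iff.mp hx⟩

-- ===== VERDICT (by name: the statement is the Claim_ definition above) =====
theorem hasEveryNumber_spec : Claim_equal_hasEveryNumber := by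
  intro path _
  unfold Spec_hasEveryNumber hasEveryNumber hasEveryNumber_alt
  by_cases hnil : path.length = 0
  · simp [hnil]
  · have hne : (path.length == 0) = false := by simp [hnil]
    rw [hne, if_neg (by simp)]
    have hloop := pvALoop_true_iff path path.length 0 (by omega)
    have hrange : ∀ j : Int, j ∈ PySem.List.pyRange 0 (path.length : Int) 1 ↔
        0 ≤ j ∧ j < (path.length : Int) := fun j => PySem.List.mem_pyRange_one
    have hEq : pvALoop path path.length 0 =
        PySem.Set.equal (PySem.Set.ofList path)
          (PySem.Set.ofList (PySem.List.pyRange 0 (path.length : Int) 1)) := by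
      by_cases hA : pvALoop path path.length 0 = true
      · rw [hA]
        symm
        rw [PySem.Set.equal_iff]
        have hall := hloop.mp hA
        have hmem := mem_iff_of_superset_same_length path
          (PySem.List.pyRange 0 (path.length : Int) 1)
          (PySem.List.nodup_pyRange_one 0 (path.length : Int))
          (by rw [PySem.List.length_pyRange_one]; omega)
          (fun x hx => by
            rcases (hrange x).mp hx with ⟨h0, h1⟩
            exact hall x h0 h1)
        intro x
        rw [PySem.Set.mem_ofList, PySem.Set.mem_ofList]
        exact hmem x
      · rw [Bool.not_eq_true] at hA
        rw [hA]
        symm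
        rw [Bool.eq_false_iff]
        intro hEq'
        rw [PySem.Set.equal_iff] at hEq'
        have : pvALoop path path.length 0 = true := by
          apply hloop.mpr
          intro j h0 h1
          rw [← PySem.Set.mem_ofList (xs := path)]
          exact (hEq' j).mpr (by rw [PySem.Set.mem_ofList]; exact (hrange j).mpr ⟨h0, h1⟩)
        rw [hA] at this; exact Bool.false_ne_true this
    rw [hEq]
    simp [hnil]
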